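-- pv_equiv track=rewrite | github.com/Bergjak/Leetcode-solutions | [hard] 1643. Kth Smallest Instructions.py | kthSmallestPath
-- ===== SOURCE A (Python) =====
-- from typing import List
--
-- import math
--
-- def kthSmallestPath(D: List[int], k: int) -> str:
--     # So, we have math.comb(H+V, H) choices since we are modeling pascal's triangle,
--     # and we want to return the k'th choice (in lexicographical order). So, say we have k > math.comb(H+V-1, H-1).
--     # Then it must be the case that result starts with V, since the number of remaining options
--     # starting with H is less than k, and so if we chose H then we'd never be able to reach the k'th choice.
--     # After the first choice, k -= math.comb(H+V-1, H-1) and then we subtract 1 from V and then recompute total.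
--     # We did k -= math.comb(H+V-1, H-1) because we are now restricted to the search space of options NOT beginning with H,
--     # so we remove from the search space all options that begin with H. And then this process continues until we run out
--     # of options, since every suffix follows the same logic as the full string.
--
--     H, V = D[1], D[0]
--     res = []
--
--     while H and V:
--         num_of_suffixes_starting_with_H = math.comb(H - 1 + V, H - 1)
--
--         if k > num_of_suffixes_starting_with_H:
--             res.append('V')
--             k -= num_of_suffixes_starting_with_H
--             V -= 1
--         else:
--             res.append('H')
--             H -= 1
--
--     return ''.join(res + ['H'] * H + ['V'] * V)
-- ===== SOURCE B (Python) =====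
-- from typing import List
--
-- import math
--
-- def kthSmallestPath(D: List[int], k: int) -> str:
--     # Different algorithm: instead of the greedy character-by-character choice,
--     # unrank the (k-1)-th combination of H-positions in the combinatorial number
--     # system (lexicographic order of H-position tuples equals lexicographic order
--     # of the strings, since 'H' < 'V').  For each of the H letters 'H' in turn we
--     # count how many whole blocks C(n-1-c, j-1) of position-tuples the rank skips,
--     # which directly yields the run of 'V's preceding that 'H'; the string is then
--     # emitted as V-run + 'H' segments plus a trailing V-run.
--     V, H = D[0], D[1]
--     n = H + V
--     r = k - 1
--     c = 0
--     parts = []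
--     for j in range(H, 0, -1):
--         start = c
--         while c < n - j and r >= math.comb(n - 1 - c, j - 1):
--             r -= math.comb(n - 1 - c, j - 1)
--             c += 1
--         parts.append('V' * (c - start) + 'H')
--         c += 1
--     return ''.join(parts) + 'V' * (n - c)
-- ===== Notes on version B (the rewrite author's own statement) =====
-- stated objective: alternative
-- what changed: B replaces the per-character greedy loop by combinatorial-number-system unranking: it interprets k-1 as the lexicographic rank of the tuple of H-positions and, for each 'H' in turn, counts in an inner loop how many C(n-1-c,j-1) blocks the rank skips, emitting the string as V-run+'H' segments plus a trailing V-run.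
import Mathlib
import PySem

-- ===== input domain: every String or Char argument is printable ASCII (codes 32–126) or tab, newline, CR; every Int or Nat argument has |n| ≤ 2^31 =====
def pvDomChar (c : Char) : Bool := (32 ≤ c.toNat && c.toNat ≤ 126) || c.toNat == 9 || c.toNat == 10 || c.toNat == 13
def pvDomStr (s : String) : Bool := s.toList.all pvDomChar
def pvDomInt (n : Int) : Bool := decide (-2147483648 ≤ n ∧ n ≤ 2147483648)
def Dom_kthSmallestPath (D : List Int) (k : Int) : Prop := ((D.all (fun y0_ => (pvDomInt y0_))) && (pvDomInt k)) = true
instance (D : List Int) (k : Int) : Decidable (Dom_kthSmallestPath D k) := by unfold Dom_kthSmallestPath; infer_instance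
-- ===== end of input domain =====

-- B replaces A's greedy per-character loop by combinatorial-number-system unranking of
-- the tuple of H-positions, emitting the string as V-run + 'H' segments (objective: alternative).

-- ===== PORT A =====
-- math.comb n r (Python returns 0 when r > n, raises ValueError on negatives;
-- negative arguments are excluded by Pre_, where combZ's value is irrelevant)
def combZ (n r : Int) : Int :=
  if 0 ≤ r ∧ r ≤ n then ((n.toNat).choose r.toNat : Int) else 0

-- the while loop of A: recomputes math.comb each iteration; fuel bounds the iterations
def loopA : Nat → Int → Int → Int → List Char → Int × Int × List Char
  | 0, H, V, _, res => (H, V, res)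
  | f + 1, H, V, k, res =>
      if H ≠ 0 ∧ V ≠ 0 then
        let c := combZ (H - 1 + V) (H - 1)
        if k > c then loopA f H (V - 1) (k - c) (res ++ ['V'])
        else loopA f (H - 1) V k (res ++ ['H'])
      else (H, V, res)

def kthSmallestPath (D : List Int) (k : Int) : String :=
  match PySem.List.pyGet? D 1, PySem.List.pyGet? D 0 with
  | some H, some V =>
      let s := loopA (H.toNat + V.toNat) H V k []
      String.ofList (s.2.2 ++ List.replicate s.1.toNat 'H' ++ List.replicate s.2.1.toNat 'V')
  | _, _ => ""  -- Python raises IndexError here; excluded by Pre_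

-- ===== PORT B =====
-- math.comb as called by B (arguments are nonnegative whenever the inner guard holds)
def combZB (n r : Int) : Int :=
  if 0 ≤ r ∧ r ≤ n then ((n.toNat).choose r.toNat : Int) else 0

-- B's inner while loop: advances the cursor c past skipped blocks, reducing the rank r
def loopInner : Nat → Int → Int → Int → Int → Int × Int
  | 0, _, _, c, r => (c, r)
  | f + 1, n, j, c, r =>
      if c < n - j ∧ r ≥ combZB (n - 1 - c) (j - 1) then
        loopInner f n j (c + 1) (r - combZB (n - 1 - c) (j - 1))
      else (c, r)

-- B's outer for loop over j = H, H-1, …, 1: emits the V-run before each 'H' and the 'H'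
def loopOuter : Nat → Int → Int → Int → Int → List Char → Int × List Char
  | 0, _, _, c, _, acc => (c, acc)
  | jn + 1, n, j, c, r, acc =>
      let s := loopInner (n.toNat + 1) n j c r
      loopOuter jn n (j - 1) (s.1 + 1) s.2
        (acc ++ List.replicate (s.1 - c).toNat 'V' ++ ['H'])

def kthSmallestPath_alt (D : List Int) (k : Int) : String :=
  match PySem.List.pyGet? D 1 with
  | none => ""  -- Python raises IndexError here; excluded by Pre_
  | some H =>
    match PySem.List.pyGet? D 0 with
    | none => ""
    | some V =>
      let n := H + V
      let s := loopOuter H.toNat n H 0 (k - 1) []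
      String.ofList (s.2 ++ List.replicate (n - s.1).toNat 'V')

-- ===== PRECONDITION & SPEC =====
-- Pre_ excludes exactly the inputs where A does not return normally: len(D) < 2 (IndexError) and
-- D[0], D[1] both nonzero with one negative (ValueError from math.comb, or a non-terminating loop).
def Pre_kthSmallestPath (D : List Int) (k : Int) : Prop :=
  2 ≤ D.length ∧ (D.getD 0 0 = 0 ∨ D.getD 1 0 = 0 ∨ (0 ≤ D.getD 0 0 ∧ 0 ≤ D.getD 1 0))
instance (D : List Int) (k : Int) : Decidable (Pre_kthSmallestPath D k) := by
  unfold Pre_kthSmallestPath; infer_instance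

def pvWitness_kthSmallestPath : List Int × Int := ([2, 3], 3)

def Spec_kthSmallestPath (D : List Int) (k : Int) (out : String) : Prop := out = kthSmallestPath_alt D k
instance (D : List Int) (k : Int) (out : String) : Decidable (Spec_kthSmallestPath D k out) := by unfold Spec_kthSmallestPath; infer_instance

-- ===== CLAIM (what is proved, stated in full; the proofs are below) =====
def Claim_equal_kthSmallestPath : Prop := ∀ (D : List Int) (k : Int), Dom_kthSmallestPath D k → Pre_kthSmallestPath D k → Spec_kthSmallestPath D k (kthSmallestPath D k)

-- ===== LEMMAS AND PROOFS =====

-- the rendering of A's final loop state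
def finalA (t : Int × Int × List Char) : List Char :=
  t.2.2 ++ List.replicate t.1.toNat 'H' ++ List.replicate t.2.1.toNat 'V'

lemma loopA_exit (f : Nat) (H V k : Int) (res : List Char) (h : ¬ (H ≠ 0 ∧ V ≠ 0)) :
    loopA f H V k res = (H, V, res) := by
  cases f <;> simp [loopA, h]

lemma loopInner_exit (f : Nat) (n j c r : Int)
    (h : ¬ (c < n - j ∧ r ≥ combZB (n - 1 - c) (j - 1))) :
    loopInner f n j c r = (c, r) := by
  cases f <;> simp [loopInner, h]

-- inner-loop simulation: loopInner's advances are exactly A's V-steps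
lemma inner_sim (fI : Nat) (n j : Int) : ∀ (c r : Int) (acc : List Char),
    1 ≤ j → 0 ≤ c → 0 ≤ n - j - c → (n - j - c).toNat ≤ fI →
    loopA (j.toNat + (n - j - c).toNat) j (n - j - c) (r + 1) acc
      = loopA (j.toNat + (n - j - (loopInner fI n j c r).1).toNat) j
          (n - j - (loopInner fI n j c r).1) ((loopInner fI n j c r).2 + 1)
          (acc ++ List.replicate ((loopInner fI n j c r).1 - c).toNat 'V')
    ∧ ¬ ((loopInner fI n j c r).1 < n - j
          ∧ (loopInner fI n j c r).2 ≥ combZB (n - 1 - (loopInner fI n j c r).1) (j - 1))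
    ∧ c ≤ (loopInner fI n j c r).1 ∧ (loopInner fI n j c r).1 ≤ n - j := by
  induction fI with
  | zero =>
      intro c r acc hj hc hv hf
      have hc0 : c = n - j := by omega
      simp only [loopInner]
      refine ⟨by simp, ?_, le_refl _, by omega⟩
      rintro ⟨h1, _⟩; omega
  | succ f ih =>
      intro c r acc hj hc hv hf
      by_cases hg : c < n - j ∧ r ≥ combZB (n - 1 - c) (j - 1)
      · simp only [loopInner, if_pos hg]
        obtain ⟨e1, e2, e3, e4⟩ := ih (c + 1) (r - combZB (n - 1 - c) (j - 1))
          (acc ++ ['V']) hj (by omega) (by omega) (by omega)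
        refine ⟨?_, e2, by omega, e4⟩
        have hm : combZ (j - 1 + (n - j - c)) (j - 1) = combZB (n - 1 - c) (j - 1) := by
          rw [combZ, combZB]
          have e : j - 1 + (n - j - c) = n - 1 - c := by ring
          rw [e]
        have hstep : loopA (j.toNat + (n - j - c).toNat) j (n - j - c) (r + 1) acc
            = loopA (j.toNat + (n - j - (c + 1)).toNat) j (n - j - (c + 1))
                (r - combZB (n - 1 - c) (j - 1) + 1) (acc ++ ['V']) := by
          have hfe : j.toNat + (n - j - c).toNat = (j.toNat + (n - j - (c + 1)).toNat) + 1 := by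
            omega
          rw [hfe]
          have hgd : j ≠ 0 ∧ n - j - c ≠ 0 := by omega
          simp only [loopA, if_pos hgd]
          rw [hm, if_pos (by omega : r + 1 > combZB (n - 1 - c) (j - 1))]
          have e1' : n - j - c - 1 = n - j - (c + 1) := by ring
          have e2' : r + 1 - combZB (n - 1 - c) (j - 1)
              = r - combZB (n - 1 - c) (j - 1) + 1 := by ring
          rw [e1', e2']
        rw [hstep, e1]
        have hrep : acc ++ ['V']
              ++ List.replicate ((loopInner f n j (c + 1) (r - combZB (n - 1 - c) (j - 1))).1 - (c + 1)).toNat 'V'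
            = acc ++ List.replicate ((loopInner f n j (c + 1) (r - combZB (n - 1 - c) (j - 1))).1 - c).toNat 'V' := by
          rw [List.append_assoc]
          congr 1
          rw [show (['V'] : List Char) = List.replicate 1 'V' from rfl, ← List.replicate_add]
          congr 1
          omega
        rw [hrep]
      · simp only [loopInner, if_neg hg]
        exact ⟨by simp, hg, le_refl _, by omega⟩

-- saturated outer loop: once c = n - j, every remaining iteration just emits an 'H'
lemma outer_sat (jn : Nat) (n : Int) : ∀ (j c r : Int) (acc : List Char),
    j = (jn : Int) → c = n - j →
    loopOuter jn n j c r acc = (n, acc ++ List.replicate jn 'H') := by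
  induction jn with
  | zero => intro j c r acc hj hc; simp [loopOuter, hc, hj]
  | succ m ih =>
      intro j c r acc hj hc
      have hex : loopInner (n.toNat + 1) n j c r = (c, r) :=
        loopInner_exit _ _ _ _ _ (by rintro ⟨h1, _⟩; omega)
      simp only [loopOuter, hex]
      rw [ih (j - 1) (c + 1) r _ (by omega) (by omega)]
      simp [List.replicate_succ, List.append_assoc]

-- main simulation: A's loop from state (j, n-j-c, r+1) renders the same string as B's outer loop
lemma main_sim (jn : Nat) (n : Int) : ∀ (j c r : Int) (acc : List Char),
    j = (jn : Int) → 0 ≤ c → 0 ≤ n - j - c →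
    finalA (loopA (j.toNat + (n - j - c).toNat) j (n - j - c) (r + 1) acc)
      = (loopOuter jn n j c r acc).2
        ++ List.replicate (n - (loopOuter jn n j c r acc).1).toNat 'V' := by
  induction jn with
  | zero =>
      intro j c r acc hj hc hv
      have hj0 : j = 0 := hj
      rw [loopA_exit _ _ _ _ _ (by omega)]
      simp only [loopOuter, finalA]
      have e : n - c = n - j - c := by omega
      simp [hj0, e]
  | succ m ih =>
      intro j c r acc hj hc hv
      have hj1 : 1 ≤ j := by omega
      have hfi : (n - j - c).toNat ≤ n.toNat + 1 := by omega
      obtain ⟨e1, e2, e3, e4⟩ := inner_sim (n.toNat + 1) n j c r acc hj1 hc hv hfi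
      set s := loopInner (n.toNat + 1) n j c r with hs
      simp only [loopOuter, ← hs]
      rw [e1]
      by_cases hv0 : n - j - s.1 = 0
      · -- A exits with V = 0; B emits the remaining 'H's with no trailing V-run
        rw [loopA_exit _ _ _ _ _ (by omega)]
        rw [outer_sat m n (j - 1) (s.1 + 1) s.2 _ (by omega) (by omega)]
        simp only [finalA]
        have h0 : (n - j - s.1).toNat = 0 := by omega
        have hjm : j.toNat = m + 1 := by omega
        simp [hjm, List.replicate_succ, List.append_assoc]
        omega
      · -- A takes an H-step; recurse via the IH
        have hrlt : ¬ ((s.2 + 1) > combZ (j - 1 + (n - j - s.1)) (j - 1)) := by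
          have hm2 : combZ (j - 1 + (n - j - s.1)) (j - 1) = combZB (n - 1 - s.1) (j - 1) := by
            rw [combZ, combZB]
            have e : j - 1 + (n - j - s.1) = n - 1 - s.1 := by ring
            rw [e]
          rw [hm2]
          omega
        have hstep : loopA (j.toNat + (n - j - s.1).toNat) j (n - j - s.1) (s.2 + 1)
              (acc ++ List.replicate (s.1 - c).toNat 'V')
            = loopA ((j - 1).toNat + (n - j - s.1).toNat) (j - 1) (n - j - s.1)
                (s.2 + 1) (acc ++ List.replicate (s.1 - c).toNat 'V' ++ ['H']) := by
          have hfe : j.toNat + (n - j - s.1).toNat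
              = ((j - 1).toNat + (n - j - s.1).toNat) + 1 := by omega
          rw [hfe]
          have hgd : j ≠ 0 ∧ n - j - s.1 ≠ 0 := by omega
          simp only [loopA, if_pos hgd, if_neg hrlt]
        rw [hstep]
        have hrec := ih (j - 1) (s.1 + 1) s.2
          (acc ++ List.replicate (s.1 - c).toNat 'V' ++ ['H']) (by omega) (by omega) (by omega)
        have e : n - (j - 1) - (s.1 + 1) = n - j - s.1 := by ring
        rw [e] at hrec
        exact hrec

-- ===== VERDICT (by name: the statement is the Claim_ definition above) =====
theorem kthSmallestPath_spec : Claim_equal_kthSmallestPath := by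
  intro D k _ hpre
  unfold Spec_kthSmallestPath
  obtain ⟨hlen, hpre⟩ := hpre
  match D, hlen with
  | a :: b :: t, _ =>
    simp only [List.getD, List.getElem?_cons_zero, List.getElem?_cons_succ, Option.getD_some] at hpre
    have hnn : (0:Int) ≤ (t.length:Int) + 1 := by omega
    have hget1 : PySem.List.pyGet? (a :: b :: t) 1 = some b := by
      simp [PySem.List.pyGet?, PySem.List.pyIdx?]
    have hget0 : PySem.List.pyGet? (a :: b :: t) 0 = some a := by
      simp [PySem.List.pyGet?, PySem.List.pyIdx?, hnn]
    simp only [kthSmallestPath, kthSmallestPath_alt, hget0, hget1]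
    -- H = b, V = a
    by_cases hb0 : 0 ≤ b ∧ 0 ≤ a
    · obtain ⟨hb, ha⟩ := hb0
      have hmain := main_sim b.toNat (b + a) b 0 (k - 1) [] (by omega) (by omega) (by omega)
      rw [show k - 1 + 1 = k from by ring] at hmain
      rw [show b + a - b - 0 = a from by ring] at hmain
      simp only [finalA] at hmain
      exact congrArg String.ofList hmain
    · -- within Pre_, one of a, b is 0 and the other is negative here: both sides are ""
      have hz : a = 0 ∨ b = 0 := by tauto
      rw [loopA_exit _ _ _ _ _ (by omega)]
      rcases hz with hz | hz
      · -- a = 0, so b < 0: A returns "", B's outer loop is empty (b.toNat = 0)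
        have hbt : b.toNat = 0 := by omega
        simp [hz, hbt, loopOuter]
      · -- b = 0, so a < 0: both sides are "" as well
        simp [hz, loopOuter, show a.toNat = 0 from by omega]
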